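-- pv_equiv track=rewrite | github.com/Arakis14/Calendar-Discord-BOT | gaming_availability.py | process_day
-- ===== SOURCE A (Python) =====
-- def process_day(day_name, times, players):
--     total_players = len(players)
--     availability_by_time = {t: {} for t in times}
--     for player_name, statuses in players:
--         for t in times:
--             availability_by_time[t][player_name] = statuses.get(t, "unknown")
--
--     results = []
--     for t in times:
--         statuses = list(availability_by_time[t].values())
--         counts = {
--             "available": statuses.count("available"),
--             "tentative": statuses.count("tentative"),
--             "unavailable": statuses.count("unavailable"),
--             "unknown": statuses.count("unknown"),
--         }
--         if counts["available"] == total_players: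
--             results.append((t, "✅ Wszyscy dostępni! Łałałiła"))
--         elif counts["available"] == 2 and counts["tentative"] == 1:
--             results.append((t, f"⚠️ Granie możliwe, dostępni (2/{total_players}, 1 niepewny)"))
--         else:
--             results.append((t, None))
--
--     # compress ranges
--     compressed, start, prev_summary = [], None, None
--     for i, (time, summary) in enumerate(results):
--         if not summary:
--             if prev_summary:
--                 compressed.append((start, results[i-1][0], prev_summary))
--                 start, prev_summary = None, None
--             continue
--         if prev_summary == summary:
--             pass
--         else:
--             if prev_summary:
--                 compressed.append((start, results[i-1][0], prev_summary))
--             start, prev_summary = time, summary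
--     if prev_summary:
--         compressed.append((start, results[-1][0], prev_summary))
--
--     if not compressed:
--         return ""  # always return a string
--
--     messages = [f"__{day_name}__"]
--     for start, end, summary in compressed:
--         if start == end:
--             messages.append(f"**{start}** — {summary}")
--         else:
--             messages.append(f"**{start}–{end}** — {summary}")
--
--     return "\n".join(messages)
-- ===== SOURCE B (Python) =====
-- def process_day(day_name, times, players):
--     total_players = len(players)
--     statuses_by_name = dict(players)  # last entry wins per name, like A's per-time dicts
--
--     compressed = []
--     start = prev_summary = prev_time = None
--     for t in times:
--         available = tentative = 0
--         for statuses in statuses_by_name.values():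
--             s = statuses.get(t, "unknown")
--             if s == "available":
--                 available += 1
--             elif s == "tentative":
--                 tentative += 1
--         if available == total_players:
--             summary = "✅ Wszyscy dostępni! Łałałiła"
--         elif available == 2 and tentative == 1:
--             summary = f"⚠️ Granie możliwe, dostępni (2/{total_players}, 1 niepewny)"
--         else:
--             summary = None
--         if summary != prev_summary:
--             if prev_summary is not None:
--                 compressed.append((start, prev_time, prev_summary))
--             if summary is not None:
--                 start, prev_summary = t, summary
--             else:
--                 start, prev_summary = None, None
--         prev_time = t
--     if prev_summary is not None:
--         compressed.append((start, prev_time, prev_summary))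
--
--     if not compressed:
--         return ""
--
--     messages = [f"__{day_name}__"]
--     for start, end, summary in compressed:
--         if start == end:
--             messages.append(f"**{start}** — {summary}")
--         else:
--             messages.append(f"**{start}–{end}** — {summary}")
--     return "\n".join(messages)
-- ===== Notes on version B (the rewrite author's own statement) =====
-- stated objective: simpler
-- what changed: B drops A's availability_by_time index, the per-time statuses list with four .count passes and the separate enumerate/results[i-1] compression pass, and instead makes one fused pass over times that counts available/tentative directly from a name->statuses dict and compresses runs on the fly by tracking the previous time.
import Mathlib
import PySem

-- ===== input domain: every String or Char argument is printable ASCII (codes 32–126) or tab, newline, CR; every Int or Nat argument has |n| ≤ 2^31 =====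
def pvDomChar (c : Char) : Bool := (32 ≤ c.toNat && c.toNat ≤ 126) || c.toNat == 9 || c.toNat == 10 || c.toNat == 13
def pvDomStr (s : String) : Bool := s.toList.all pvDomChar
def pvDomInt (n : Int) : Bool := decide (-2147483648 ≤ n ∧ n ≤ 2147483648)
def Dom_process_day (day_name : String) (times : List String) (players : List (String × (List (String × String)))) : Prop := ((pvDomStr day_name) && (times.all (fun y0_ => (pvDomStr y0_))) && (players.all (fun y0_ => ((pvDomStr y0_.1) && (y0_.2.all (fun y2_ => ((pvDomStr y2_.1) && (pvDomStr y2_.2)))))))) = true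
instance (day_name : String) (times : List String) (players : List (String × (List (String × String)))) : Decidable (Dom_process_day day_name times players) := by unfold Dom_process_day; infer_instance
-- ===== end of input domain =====

-- B replaces A's per-time availability index and four-way .count dict by one fused pass over
-- `times` that counts directly and compresses runs on the fly (objective: simpler decomposition).

-- ===== PORT A =====
def process_day (day_name : String) (times : List String) (players : List (String × (List (String × String)))) : String :=
  let total_players : Int := (players.length : Int)
  let abt0 : PySem.Dict String (PySem.Dict String String) :=
    times.foldl (fun d t => d.insert t PySem.Dict.empty) PySem.Dict.empty
  let abt : PySem.Dict String (PySem.Dict String String) :=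
    players.foldl (fun d pl =>
      times.foldl (fun d t =>
        d.modify t PySem.Dict.empty (fun inner => inner.insert pl.1 ((pl.2.lookup t).getD "unknown"))) d) abt0
  let results : List (String × Option String) :=
    times.foldl (fun rs t =>
      let statuses := (abt.getD t PySem.Dict.empty).values
      let counts : PySem.Dict String Int := PySem.Dict.ofList
        [("available", (statuses.count "available" : Int)),
         ("tentative", (statuses.count "tentative" : Int)),
         ("unavailable", (statuses.count "unavailable" : Int)),
         ("unknown", (statuses.count "unknown" : Int))]
      if counts.getD "available" 0 = total_players then
        rs ++ [(t, some "✅ Wszyscy dostępni! Łałałiła")]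
      else if counts.getD "available" 0 = 2 ∧ counts.getD "tentative" 0 = 1 then
        rs ++ [(t, some ("⚠️ Granie możliwe, dostępni (2/" ++ PySem.Int.toStr total_players ++ ", 1 niepewny)"))]
      else
        rs ++ [(t, none)]) []
  -- compress ranges ('not summary' / 'if prev_summary' are Python truthiness on Optional[str])
  let st : List (String × String × String) × Option String × Option String :=
    (PySem.List.enumerate results).foldl (fun s p =>
      if p.2.2.getD "" = "" then
        if s.2.2.getD "" ≠ "" then
          (s.1 ++ [(s.2.1.getD "", ((PySem.List.pyGet? results (p.1 - 1)).getD ("", none)).1, s.2.2.getD "")], none, none)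
        else s
      else if s.2.2 = p.2.2 then s
      else if s.2.2.getD "" ≠ "" then
        (s.1 ++ [(s.2.1.getD "", ((PySem.List.pyGet? results (p.1 - 1)).getD ("", none)).1, s.2.2.getD "")], some p.2.1, p.2.2)
      else (s.1, some p.2.1, p.2.2)) ([], none, none)
  let compressed : List (String × String × String) :=
    if st.2.2.getD "" ≠ "" then
      st.1 ++ [(st.2.1.getD "", ((PySem.List.pyGet? results (-1)).getD ("", none)).1, st.2.2.getD "")]
    else st.1
  if compressed = [] then ""
  else
    let messages := compressed.foldl (fun ms e =>
      if e.1 = e.2.1 then ms ++ ["**" ++ e.1 ++ "** — " ++ e.2.2]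
      else ms ++ ["**" ++ e.1 ++ "–" ++ e.2.1 ++ "** — " ++ e.2.2]) ["__" ++ day_name ++ "__"]
    PySem.Str.join "\n" messages

-- ===== PORT B =====
def process_day_alt (day_name : String) (times : List String) (players : List (String × (List (String × String)))) : String :=
  let total_players : Int := (players.length : Int)
  let statuses_by_name : PySem.Dict String (List (String × String)) := PySem.Dict.ofList players
  let st : List (String × String × String) × Option String × Option String × Option String :=
    times.foldl (fun s t =>
      let c : Int × Int := statuses_by_name.values.foldl (fun c sts =>
        if (sts.lookup t).getD "unknown" = "available" then (c.1 + 1, c.2)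
        else if (sts.lookup t).getD "unknown" = "tentative" then (c.1, c.2 + 1)
        else c) (0, 0)
      let summary : Option String :=
        if c.1 = total_players then some "✅ Wszyscy dostępni! Łałałiła"
        else if c.1 = 2 ∧ c.2 = 1 then some ("⚠️ Granie możliwe, dostępni (2/" ++ PySem.Int.toStr total_players ++ ", 1 niepewny)")
        else none
      if summary ≠ s.2.2.1 then
        let comp2 := match s.2.2.1 with
          | some ps => s.1 ++ [(s.2.1.getD "", s.2.2.2.getD "", ps)]
          | none => s.1
        match summary with
        | some _ => (comp2, some t, summary, some t)
        | none => (comp2, none, none, some t)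
      else (s.1, s.2.1, s.2.2.1, some t)) ([], none, none, none)
  let compressed : List (String × String × String) :=
    match st.2.2.1 with
    | some ps => st.1 ++ [(st.2.1.getD "", st.2.2.2.getD "", ps)]
    | none => st.1
  if compressed = [] then ""
  else
    let messages := compressed.foldl (fun ms e =>
      if e.1 = e.2.1 then ms ++ ["**" ++ e.1 ++ "** — " ++ e.2.2]
      else ms ++ ["**" ++ e.1 ++ "–" ++ e.2.1 ++ "** — " ++ e.2.2]) ["__" ++ day_name ++ "__"]
    PySem.Str.join "\n" messages

-- ===== PRECONDITION & SPEC =====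
def Spec_process_day (day_name : String) (times : List String) (players : List (String × (List (String × String)))) (out : String) : Prop := out = process_day_alt day_name times players
instance (day_name : String) (times : List String) (players : List (String × (List (String × String)))) (out : String) : Decidable (Spec_process_day day_name times players out) := by unfold Spec_process_day; infer_instance

-- ===== CLAIM (what is proved, stated in full; the proofs are below) =====
def Claim_equal_process_day : Prop := ∀ (day_name : String) (times : List String) (players : List (String × (List (String × String)))), Dom_process_day day_name times players → Spec_process_day day_name times players (process_day day_name times players)


-- ===== LEMMAS AND PROOFS =====

-- the per-time status of one player, and the common per-time summary both programs compute
def pvStat (t : String) (sts : List (String × String)) : String := (sts.lookup t).getD "unknown"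

def pvVals (players : List (String × (List (String × String)))) (t : String) : List String :=
  (PySem.Dict.ofList players).values.map (pvStat t)

def pvSum (total : Int) (players : List (String × (List (String × String)))) (t : String) : Option String :=
  if ((pvVals players t).count "available" : Int) = total then some "✅ Wszyscy dostępni! Łałałiła"
  else if ((pvVals players t).count "available" : Int) = 2 ∧ ((pvVals players t).count "tentative" : Int) = 1 then
    some ("⚠️ Granie możliwe, dostępni (2/" ++ PySem.Int.toStr total ++ ", 1 niepewny)")
  else none

def pvRS (total : Int) (players : List (String × (List (String × String)))) (times : List String) :
    List (String × Option String) :=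
  times.map (fun t => (t, pvSum total players t))

-- A's compression step / finish and B's, as named functions of the (time, summary) stream
def pvStepA (results : List (String × Option String))
    (s : List (String × String × String) × Option String × Option String)
    (p : Int × String × Option String) : List (String × String × String) × Option String × Option String :=
  if p.2.2.getD "" = "" then
    if s.2.2.getD "" ≠ "" then
      (s.1 ++ [(s.2.1.getD "", ((PySem.List.pyGet? results (p.1 - 1)).getD ("", none)).1, s.2.2.getD "")], none, none)
    else s
  else if s.2.2 = p.2.2 then s
  else if s.2.2.getD "" ≠ "" then
    (s.1 ++ [(s.2.1.getD "", ((PySem.List.pyGet? results (p.1 - 1)).getD ("", none)).1, s.2.2.getD "")], some p.2.1, p.2.2)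
  else (s.1, some p.2.1, p.2.2)

def pvFinA (results : List (String × Option String))
    (st : List (String × String × String) × Option String × Option String) : List (String × String × String) :=
  if st.2.2.getD "" ≠ "" then
    st.1 ++ [(st.2.1.getD "", ((PySem.List.pyGet? results (-1)).getD ("", none)).1, st.2.2.getD "")]
  else st.1

def pvStepB (s : List (String × String × String) × Option String × Option String × Option String)
    (p : String × Option String) : List (String × String × String) × Option String × Option String × Option String :=
  if p.2 ≠ s.2.2.1 then
    let comp2 := match s.2.2.1 with
      | some ps => s.1 ++ [(s.2.1.getD "", s.2.2.2.getD "", ps)]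
      | none => s.1
    match p.2 with
    | some _ => (comp2, some p.1, p.2, some p.1)
    | none => (comp2, none, none, some p.1)
  else (s.1, s.2.1, s.2.2.1, some p.1)

def pvFinB (st : List (String × String × String) × Option String × Option String × Option String) :
    List (String × String × String) :=
  match st.2.2.1 with
  | some ps => st.1 ++ [(st.2.1.getD "", st.2.2.2.getD "", ps)]
  | none => st.1

-- the shared message-building tail of both ports
def pvMsg (day_name : String) (compressed : List (String × String × String)) : String :=
  if compressed = [] then ""
  else
    let messages := compressed.foldl (fun ms e =>
      if e.1 = e.2.1 then ms ++ ["**" ++ e.1 ++ "** — " ++ e.2.2]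
      else ms ++ ["**" ++ e.1 ++ "–" ++ e.2.1 ++ "** — " ++ e.2.2]) ["__" ++ day_name ++ "__"]
    PySem.Str.join "\n" messages

lemma pvPyGet_last {α : Type} (xs : List α) (h : xs ≠ []) :
    PySem.List.pyGet? xs (-1) = some (xs.getLast h) := by
  have hn : 0 < xs.length := List.length_pos_iff.mpr h
  simp only [PySem.List.pyGet?, PySem.List.pyIdx?]
  rw [if_neg (by omega), if_pos (by exact_mod_cast by omega)]
  simp only [Option.bind]
  rw [List.getLast_eq_getElem, List.getElem?_eq_getElem (by omega)]
  norm_num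

lemma pvPyGet_pre {α : Type} (pre suf : List α) (h : pre ≠ []) :
    PySem.List.pyGet? (pre ++ suf) ((pre.length : Int) - 1) = some (pre.getLast h) := by
  have hn : 0 < pre.length := List.length_pos_iff.mpr h
  simp only [PySem.List.pyGet?, PySem.List.pyIdx?]
  rw [if_pos (by omega), if_pos (by simp)]
  simp only [Option.bind]
  have h1 : ((pre.length : Int) - 1).toNat = pre.length - 1 := by omega
  rw [h1, List.getElem?_append_left (by omega), List.getLast_eq_getElem,
    List.getElem?_eq_getElem (by omega)]

-- projecting the '{t: {} for t in times}' build at one key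
lemma pvA1 (ts : List String) (t : String) :
    ∀ (d : PySem.Dict String (PySem.Dict String String)), d.getD t PySem.Dict.empty = PySem.Dict.empty →
    ((ts.foldl (fun d t' => d.insert t' PySem.Dict.empty) d).getD t PySem.Dict.empty) = PySem.Dict.empty := by
  induction ts with
  | nil => intro d hd; simpa using hd
  | cons x rest ih =>
      intro d hd
      simp only [List.foldl_cons]
      exact ih _ (by rw [PySem.Dict.getD_insert]; split_ifs <;> simp [hd])

-- projecting one player's inner time loop at one key
lemma pvA2 (ts : List String) (t name : String) (g : String → String) :
    ∀ (d : PySem.Dict String (PySem.Dict String String)),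
    ((ts.foldl (fun d t' => d.modify t' PySem.Dict.empty (fun inner => inner.insert name (g t'))) d).getD t PySem.Dict.empty)
      = if t ∈ ts then (d.getD t PySem.Dict.empty).insert name (g t) else d.getD t PySem.Dict.empty := by
  induction ts with
  | nil => intro d; simp
  | cons x rest ih =>
      intro d
      simp only [List.foldl_cons, ih, PySem.Dict.getD_modify, List.mem_cons]
      by_cases hx : t = x
      · subst hx
        by_cases hr : t ∈ rest <;> simp [hr, PySem.Dict.insert_insert_self]
      · by_cases hr : t ∈ rest <;> simp [hr, hx]

-- projecting the whole availability build at one key t ∈ times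
lemma pvA3 (times : List String) (t : String) (ht : t ∈ times) (ps : List (String × (List (String × String)))) :
    ∀ (d : PySem.Dict String (PySem.Dict String String)),
    ((ps.foldl (fun d pl =>
        times.foldl (fun d t' =>
          d.modify t' PySem.Dict.empty (fun inner => inner.insert pl.1 ((pl.2.lookup t').getD "unknown"))) d) d).getD t PySem.Dict.empty)
      = ps.foldl (fun acc pl => acc.insert pl.1 ((pl.2.lookup t).getD "unknown")) (d.getD t PySem.Dict.empty) := by
  induction ps with
  | nil => intro d; simp
  | cons pl rest ih =>
      intro d
      simp only [List.foldl_cons, ih]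
      rw [pvA2 times t pl.1 (fun t' => (pl.2.lookup t').getD "unknown") d, if_pos ht]

-- inserting f-transformed values is an items-map of inserting the raw values
lemma pvA4 {ν ν' : Type} (f : ν → ν') (ps : List (String × ν)) :
    ∀ (d : PySem.Dict String ν) (d' : PySem.Dict String ν'),
    d'.items = d.items.map (fun kv => (kv.1, f kv.2)) →
    (ps.foldl (fun acc pl => acc.insert pl.1 (f pl.2)) d').items
      = (ps.foldl (fun acc pl => acc.insert pl.1 pl.2) d).items.map (fun kv => (kv.1, f kv.2)) := by
  induction ps with
  | nil => intro d d' h; simpa using h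
  | cons pl rest ih =>
      intro d d' h
      simp only [List.foldl_cons]
      apply ih
      have hc : d'.contains pl.1 = d.contains pl.1 := by
        rw [PySem.Dict.contains_eq_decide_mem_keys, PySem.Dict.contains_eq_decide_mem_keys]
        simp [PySem.Dict.keys, h, List.map_map, Function.comp_def]
      rw [PySem.Dict.items_insert, PySem.Dict.items_insert, hc]
      by_cases hk : d.contains pl.1
      · rw [if_pos hk, if_pos hk, h, List.map_map, List.map_map]
        apply List.map_congr_left
        intro p _
        by_cases hp : p.1 = pl.1 <;> simp [hp]
      · rw [if_neg hk, if_neg hk, h, List.map_append]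
        simp

-- A's statuses list at t ∈ times is pvVals
lemma pvAVals (times : List String) (t : String) (ht : t ∈ times) (players : List (String × (List (String × String)))) :
    ((players.foldl (fun d pl =>
        times.foldl (fun d t' =>
          d.modify t' PySem.Dict.empty (fun inner => inner.insert pl.1 ((pl.2.lookup t').getD "unknown"))) d)
        (times.foldl (fun d t' => d.insert t' PySem.Dict.empty) PySem.Dict.empty)).getD t PySem.Dict.empty).values
      = pvVals players t := by
  rw [pvA3 times t ht players, pvA1 times t PySem.Dict.empty (by simp [PySem.Dict.getD_empty])]
  have h4 := pvA4 (fun sts => (sts.lookup t).getD "unknown") players PySem.Dict.empty PySem.Dict.empty (by rfl)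
  show (players.foldl (fun acc pl => acc.insert pl.1 ((pl.2.lookup t).getD "unknown")) PySem.Dict.empty).values = _
  simp only [PySem.Dict.values, h4, List.map_map]
  simp [pvVals, pvStat, PySem.Dict.values, PySem.Dict.ofList, PySem.Dict.update, Function.comp_def, List.map_map]

-- reading A's four-entry counts dict
lemma pvCD_avail (a b c d : Int) :
    (PySem.Dict.ofList [("available", a), ("tentative", b), ("unavailable", c), ("unknown", d)]
      : PySem.Dict String Int).getD "available" 0 = a := by
  show (((((PySem.Dict.empty : PySem.Dict String Int).insert "available" a).insert "tentative" b).insert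
      "unavailable" c).insert "unknown" d).getD "available" 0 = a
  simp [PySem.Dict.getD_insert]

lemma pvCD_tent (a b c d : Int) :
    (PySem.Dict.ofList [("available", a), ("tentative", b), ("unavailable", c), ("unknown", d)]
      : PySem.Dict String Int).getD "tentative" 0 = b := by
  show (((((PySem.Dict.empty : PySem.Dict String Int).insert "available" a).insert "tentative" b).insert
      "unavailable" c).insert "unknown" d).getD "tentative" 0 = b
  simp [PySem.Dict.getD_insert]

-- B's counting loop is the two counts
lemma pvB1 {ν : Type} (g : ν → String) (l : List ν) :
    ∀ (a b : Int),
    l.foldl (fun c sts => if g sts = "available" then (c.1 + 1, c.2)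
        else if g sts = "tentative" then (c.1, c.2 + 1) else c) (a, b)
      = (a + ((l.map g).count "available" : Int), b + ((l.map g).count "tentative" : Int)) := by
  induction l with
  | nil => intro a b; simp
  | cons x rest ih =>
      intro a b
      simp only [List.foldl_cons, List.map_cons, List.count_cons]
      by_cases h1 : g x = "available"
      · rw [if_pos h1, ih]
        simp [h1]
        ring
      · by_cases h2 : g x = "tentative"
        · rw [if_neg h1, if_pos h2, ih]
          simp [h2]
          ring
        · rw [if_neg h1, if_neg h2, ih]
          simp [h1, h2]

lemma pvWarn_ne_empty (z : String) :
    ("⚠️ Granie możliwe, dostępni (2/" ++ z ++ ", 1 niepewny)") ≠ "" := by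
  intro h
  have := congrArg PySem.Str.len h
  rw [PySem.Str.len_append, PySem.Str.len_append] at this
  simp [PySem.Str.len] at this
  omega

lemma pvSum_ne_some_empty (total : Int) (players : List (String × (List (String × String)))) (t : String) :
    pvSum total players t ≠ some "" := by
  unfold pvSum
  split_ifs with h1 h2
  · simp
  · intro h
    exact pvWarn_ne_empty (PySem.Int.toStr total) (by simpa using h)
  · simp

-- the heart: A's index-based range compression equals B's previous-time-based one
lemma pvComp (rs : List (String × Option String)) (hrs : ∀ p ∈ rs, p.2 ≠ some "") :
    ∀ (suf pre : List (String × Option String)) (comp : List (String × String × String))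
      (start prevSum prevTime : Option String),
    rs = pre ++ suf →
    prevSum ≠ some "" →
    (∀ s, prevSum = some s → ∃ h : pre ≠ [], prevTime = some ((pre.getLast h).1)) →
    pvFinA rs ((PySem.List.enumerate suf (pre.length : Int)).foldl (pvStepA rs) (comp, start, prevSum))
      = pvFinB (suf.foldl pvStepB (comp, start, prevSum, prevTime)) := by
  intro suf
  induction suf with
  | nil =>
      intro pre comp start prevSum prevTime hpre hne hpt
      simp only [PySem.List.enumerate, List.foldl_nil]
      cases prevSum with
      | none => simp [pvFinA, pvFinB]
      | some s0 =>
          obtain ⟨hp, hpt'⟩ := hpt s0 rfl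
          have hrs' : rs ≠ [] := by simp [hpre, List.append_nil]; exact hp
          have hs0 : s0 ≠ "" := by intro h; exact hne (by rw [h])
          simp only [pvFinA, pvFinB, Option.getD_some]
          rw [if_pos hs0, pvPyGet_last rs hrs']
          have : rs.getLast hrs' = pre.getLast hp := by
            congr 1 <;> simp [hpre]
          rw [this, hpt']
          simp
  | cons x rest ih =>
      intro pre comp start prevSum prevTime hpre hne hpt
      have hx : x.2 ≠ some "" := hrs x (by rw [hpre]; exact List.mem_append_right _ (List.mem_cons_self))
      rw [PySem.List.enumerate_cons, List.foldl_cons, List.foldl_cons]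
      have hlen : (pre.length : Int) + 1 = (((pre ++ [x]).length : Int)) := by simp
      have hpre' : rs = (pre ++ [x]) ++ rest := by rw [hpre]; simp
      have hlast : ((pre ++ [x]).getLast (by simp)) = x := List.getLast_concat
      cases hxs : x.2 with
      | none =>
          cases prevSum with
          | none =>
              have hA : pvStepA rs (comp, start, none) ((pre.length : Int), x) = (comp, start, none) := by
                simp [pvStepA, hxs]
              have hB : pvStepB (comp, start, none, prevTime) x = (comp, start, none, some x.1) := by
                simp [pvStepB, hxs]
              rw [hA, hB, hlen]
              exact ih (pre ++ [x]) comp start none (some x.1) hpre' (by simp) (by intro s h; cases h)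
          | some s0 =>
              obtain ⟨hp, hpt'⟩ := hpt s0 rfl
              have hs0 : s0 ≠ "" := by intro h; exact hne (by rw [h])
              have hA : pvStepA rs (comp, start, some s0) ((pre.length : Int), x)
                  = (comp ++ [(start.getD "", (pre.getLast hp).1, s0)], none, none) := by
                simp only [pvStepA, hxs]
                rw [hpre]
                rw [pvPyGet_pre pre (x :: rest) hp]
                simp [hs0]
              have hB : pvStepB (comp, start, some s0, prevTime) x
                  = (comp ++ [(start.getD "", (pre.getLast hp).1, s0)], none, none, some x.1) := by
                simp [pvStepB, hxs, hpt']
              rw [hA, hB, hlen]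
              exact ih (pre ++ [x]) _ none none (some x.1) hpre' (by simp) (by intro s h; cases h)
      | some v =>
          have hv : v ≠ "" := by intro h; exact hx (by rw [hxs, h])
          by_cases heq : prevSum = some v
          · subst heq
            have hA : pvStepA rs (comp, start, some v) ((pre.length : Int), x) = (comp, start, some v) := by
              simp [pvStepA, hxs, hv]
            have hB : pvStepB (comp, start, some v, prevTime) x = (comp, start, some v, some x.1) := by
              simp [pvStepB, hxs]
            rw [hA, hB, hlen]
            refine ih (pre ++ [x]) comp start (some v) (some x.1) hpre' hne ?_
            intro s h
            refine ⟨by simp, ?_⟩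
            rw [hlast]
          · cases prevSum with
            | none =>
                have hA : pvStepA rs (comp, start, none) ((pre.length : Int), x)
                    = (comp, some x.1, some v) := by
                  simp [pvStepA, hxs, hv]
                have hB : pvStepB (comp, start, none, prevTime) x
                    = (comp, some x.1, some v, some x.1) := by
                  simp [pvStepB, hxs]
                rw [hA, hB, hlen]
                refine ih (pre ++ [x]) comp (some x.1) (some v) (some x.1) hpre'
                  (by intro h; exact hv (by simpa using h)) ?_
                intro s h
                refine ⟨by simp, ?_⟩
                rw [hlast]
            | some s0 =>
                have hs0 : s0 ≠ "" := by intro h; exact hne (by rw [h])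
                have hsv : s0 ≠ v := by intro h; exact heq (by rw [h])
                have hp : pre ≠ [] := (hpt s0 rfl).1
                have hpt' : prevTime = some ((pre.getLast hp).1) := (hpt s0 rfl).2
                have hA : pvStepA rs (comp, start, some s0) ((pre.length : Int), x)
                    = (comp ++ [(start.getD "", (pre.getLast hp).1, s0)], some x.1, some v) := by
                  simp only [pvStepA, hxs]
                  rw [hpre, pvPyGet_pre pre (x :: rest) hp]
                  simp [hs0, hv, hsv]
                have hB : pvStepB (comp, start, some s0, prevTime) x
                    = (comp ++ [(start.getD "", (pre.getLast hp).1, s0)], some x.1, some v, some x.1) := by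
                  have hvs : v ≠ s0 := fun h => hsv h.symm
                  simp [pvStepB, hxs, hpt', hvs]
                rw [hA, hB, hlen]
                refine ih (pre ++ [x]) _ (some x.1) (some v) (some x.1) hpre'
                  (by intro h; exact hv (by simpa using h)) ?_
                intro s h
                refine ⟨by simp, ?_⟩
                rw [hlast]

-- A in normal form
lemma pvAform (day_name : String) (times : List String) (players : List (String × (List (String × String)))) :
    process_day day_name times players
      = pvMsg day_name (pvFinA (pvRS (players.length : Int) players times)
          ((PySem.List.enumerate (pvRS (players.length : Int) players times)).foldl
            (pvStepA (pvRS (players.length : Int) players times)) ([], none, none))) := by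
  have hR : times.foldl (fun rs t =>
      let statuses := ((players.foldl (fun d pl =>
          times.foldl (fun d t' =>
            d.modify t' PySem.Dict.empty (fun inner => inner.insert pl.1 ((pl.2.lookup t').getD "unknown"))) d)
          (times.foldl (fun d t' => d.insert t' PySem.Dict.empty) PySem.Dict.empty)).getD t PySem.Dict.empty).values
      let counts : PySem.Dict String Int := PySem.Dict.ofList
        [("available", (statuses.count "available" : Int)),
         ("tentative", (statuses.count "tentative" : Int)),
         ("unavailable", (statuses.count "unavailable" : Int)),
         ("unknown", (statuses.count "unknown" : Int))]
      if counts.getD "available" 0 = (players.length : Int) then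
        rs ++ [(t, some "✅ Wszyscy dostępni! Łałałiła")]
      else if counts.getD "available" 0 = 2 ∧ counts.getD "tentative" 0 = 1 then
        rs ++ [(t, some ("⚠️ Granie możliwe, dostępni (2/" ++ PySem.Int.toStr (players.length : Int) ++ ", 1 niepewny)"))]
      else
        rs ++ [(t, none)]) []
      = pvRS (players.length : Int) players times := by
    refine Eq.trans (PySem.List.foldl_congr_mem times _
      (fun rs t => rs ++ [(t, pvSum (players.length : Int) players t)]) [] ?_) ?_
    · intro acc t ht
      simp only [pvAVals times t ht players, pvCD_avail, pvCD_tent]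
      unfold pvSum
      split_ifs <;> rfl
    · rw [PySem.List.foldl_append_singleton_eq_map]
      simp [pvRS]
  rw [← hR]
  rfl

-- B in normal form
lemma pvBform (day_name : String) (times : List String) (players : List (String × (List (String × String)))) :
    process_day_alt day_name times players
      = pvMsg day_name (pvFinB (times.foldl
          (fun s t => pvStepB s (t, pvSum (players.length : Int) players t)) ([], none, none, none))) := by
  have hbody : (fun (s : List (String × String × String) × Option String × Option String × Option String) (t : String) =>
      let c : Int × Int := (PySem.Dict.ofList players : PySem.Dict String (List (String × String))).values.foldl (fun c sts =>
        if (sts.lookup t).getD "unknown" = "available" then (c.1 + 1, c.2)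
        else if (sts.lookup t).getD "unknown" = "tentative" then (c.1, c.2 + 1)
        else c) (0, 0)
      let summary : Option String :=
        if c.1 = (players.length : Int) then some "✅ Wszyscy dostępni! Łałałiła"
        else if c.1 = 2 ∧ c.2 = 1 then some ("⚠️ Granie możliwe, dostępni (2/" ++ PySem.Int.toStr (players.length : Int) ++ ", 1 niepewny)")
        else none
      if summary ≠ s.2.2.1 then
        let comp2 := match s.2.2.1 with
          | some ps => s.1 ++ [(s.2.1.getD "", s.2.2.2.getD "", ps)]
          | none => s.1
        match summary with
        | some _ => (comp2, some t, summary, some t)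
        | none => (comp2, none, none, some t)
      else (s.1, s.2.1, s.2.2.1, some t))
      = fun s t => pvStepB s (t, pvSum (players.length : Int) players t) := by
    funext s t
    rw [pvB1 (fun sts => (sts.lookup t).getD "unknown")
      ((PySem.Dict.ofList players : PySem.Dict String (List (String × String))).values) 0 0]
    simp only [zero_add]
    rfl
  rw [← hbody]
  rfl

-- ===== VERDICT (by name: the statement is the Claim_ definition above) =====
theorem process_day_spec : Claim_equal_process_day := by
  intro day_name times players _
  show process_day day_name times players = process_day_alt day_name times players
  rw [pvAform, pvBform]
  apply congrArg (pvMsg day_name)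
  have hrs : ∀ p ∈ pvRS (players.length : Int) players times, p.2 ≠ some "" := by
    intro p hp
    simp only [pvRS, List.mem_map] at hp
    obtain ⟨t, _, rfl⟩ := hp
    exact pvSum_ne_some_empty _ players t
  have hm : (pvRS (players.length : Int) players times).foldl pvStepB ([], none, none, none)
      = times.foldl (fun s t => pvStepB s (t, pvSum (players.length : Int) players t)) ([], none, none, none) := by
    show ((times.map (fun t => (t, pvSum (players.length : Int) players t))).foldl pvStepB ([], none, none, none)) = _
    exact List.foldl_map
  have h := pvComp (pvRS (players.length : Int) players times) hrs
    (pvRS (players.length : Int) players times) [] [] none none none rfl (by simp) (by intro s h; cases h)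
  rw [hm] at h
  exact h
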